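-- pv_equiv track=rewrite | github.com/andrefisch/PythonScripts | ambiguousEncoding.py | AmbiguousEncoding
-- ===== SOURCE A (Python) =====
-- def AmbiguousEncoding(s):
--     x = y = 1
--     p = '0'
--     for c in s:
--         y *= c > '0'
--         x *= '09' < p + c < '27'
--         y += x
--         x = y - x
--
--         p = c
--
--     return y % 1000003
-- ===== SOURCE B (Python) =====
-- def AmbiguousEncoding(s):
--     # Right-to-left suffix DP over u = '0' + s (the message decodes as the tail
--     # of a tokenization opened by a leading zero).
--     # solo[k] = ways to decode u[k:] from scratch: u[k] must be above '0' to
--     # open a token, which is u[k] alone or the pair u[k:k+2] when that slice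
--     # lies strictly between '09' and '27'.
--     u = '0' + s
--     m = len(s)
--     solo = [0] * (m + 2)
--     solo[m + 1] = 1
--     solo[m] = '0' < u[m]
--     head = 1
--     for j in range(m - 1, -1, -1):
--         head = solo[j + 1] + ('09' < u[j:j + 2] < '27') * solo[j + 2]
--         solo[j] = ('0' < u[j]) * head
--     return head % 1000003
-- ===== Notes on version B (the rewrite author's own statement) =====
-- stated objective: alternative
-- what changed: Replaced A's left-to-right rolling fold over state (x, y, p) with a right-to-left suffix DP over the zero-prefixed string, computing per suffix the decodings-from-scratch count and the finish-after-an-opened-token count by the token-grammar recurrences.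
import Mathlib
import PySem

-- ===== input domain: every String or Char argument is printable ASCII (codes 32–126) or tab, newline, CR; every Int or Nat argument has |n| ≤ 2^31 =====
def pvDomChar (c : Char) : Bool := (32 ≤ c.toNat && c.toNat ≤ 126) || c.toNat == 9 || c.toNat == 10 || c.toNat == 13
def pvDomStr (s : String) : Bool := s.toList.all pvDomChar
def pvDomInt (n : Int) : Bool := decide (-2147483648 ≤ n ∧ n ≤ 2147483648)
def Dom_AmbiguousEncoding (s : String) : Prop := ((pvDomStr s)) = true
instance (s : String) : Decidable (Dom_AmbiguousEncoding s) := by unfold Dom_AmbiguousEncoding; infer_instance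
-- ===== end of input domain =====

-- B replaces A's left-to-right rolling fold (x, y, p) by a right-to-left suffix DP
-- over the '0'-prefixed string (alternative decomposition, same cost); the return
-- values are proved equal on Dom.

-- shared helper: Python's chained comparison  '09' < cd < '27'  on the 2-char slice,
-- as 0/1; exact lexicographic (code-point) comparison of two length-2 strings
def pairInd (c d : Char) : Int :=
  if (('0' < c ∨ ('0' = c ∧ '9' < d)) ∧ (c < '2' ∨ (c = '2' ∧ d < '7'))) then 1 else 0

-- helper:  ('0' < c)  as 0/1
def oneInd (c : Char) : Int := if '0' < c then 1 else 0

-- ===== PORT A =====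
-- one iteration of A's for-loop over state (x, y, p)
def aStep (st : Int × Int × Char) (c : Char) : Int × Int × Char :=
  let y1 := st.2.1 * oneInd c
  let x1 := st.1 * pairInd st.2.2 c
  let y2 := y1 + x1
  let x2 := y2 - x1
  (x2, y2, c)

def AmbiguousEncoding (s : String) : Int :=
  let st := s.toList.foldl aStep (1, 1, '0')
  PySem.Int.mod st.2.1 1000003

-- ===== PORT B =====
-- Source B's solo[k] = ways to decode the suffix u[k:] from scratch, filled right to
-- left: the array loop is this structural recursion over the suffix, value for value
def soloF : List Char → Int
  | [] => 1
  | [c] => oneInd c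
  | c :: d :: r => oneInd c * (soloF (d :: r) + pairInd c d * soloF r)

-- Source B's head at position j: ways once u[j] (= p) has opened a token
def headF (p : Char) : List Char → Int
  | [] => 1
  | c :: r => soloF (c :: r) + pairInd p c * soloF r

def AmbiguousEncoding_alt (s : String) : Int :=
  PySem.Int.mod (headF '0' s.toList) 1000003

-- ===== PRECONDITION & SPEC =====
def Spec_AmbiguousEncoding (s : String) (out : Int) : Prop := out = AmbiguousEncoding_alt s
instance (s : String) (out : Int) : Decidable (Spec_AmbiguousEncoding s out) := by unfold Spec_AmbiguousEncoding; infer_instance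

-- ===== CLAIM (what is proved, stated in full; the proofs are below) =====
def Claim_equal_AmbiguousEncoding : Prop := ∀ (s : String), Dom_AmbiguousEncoding s → Spec_AmbiguousEncoding s (AmbiguousEncoding s)

-- ===== LEMMAS AND PROOFS =====

-- proof helper: the contribution of a pair whose first char is the previous character p
def tB (p : Char) : List Char → Int
  | [] => 0
  | c :: r => pairInd p c * soloF r

theorem soloF_cons (c : Char) (rest : List Char) :
    soloF (c :: rest) = oneInd c * soloF rest + oneInd c * tB c rest := by
  cases rest with
  | nil => simp [soloF, tB]
  | cons d r => simp [soloF, tB]; ring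

theorem fold_eq (l : List Char) : ∀ (x y : Int) (p : Char),
    (l.foldl aStep (x, y, p)).2.1 = y * soloF l + x * tB p l := by
  induction l with
  | nil => intro x y p; simp [soloF, tB]
  | cons c rest ih =>
      intro x y p
      show (rest.foldl aStep (aStep (x, y, p) c)).2.1 = _
      rw [show aStep (x, y, p) c
            = (y * oneInd c, y * oneInd c + x * pairInd p c, c) from by
            simp [aStep]]
      rw [ih, soloF_cons, tB]
      ring

theorem headF_eq (p : Char) (l : List Char) :
    headF p l = soloF l + tB p l := by
  cases l with
  | nil => simp [headF, soloF, tB]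
  | cons c r => simp [headF, tB]

-- ===== VERDICT (by name: the statement is the Claim_ definition above) =====
theorem AmbiguousEncoding_spec : Claim_equal_AmbiguousEncoding := by
  intro s _
  show AmbiguousEncoding s = AmbiguousEncoding_alt s
  simp only [AmbiguousEncoding, AmbiguousEncoding_alt]
  rw [headF_eq, fold_eq]
  ring_nf
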